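-- pv_equiv track=rewrite | github.com/WaterH2P/Algorithm | OJ/HS/review/string/mat_2.py | find
-- ===== SOURCE A (Python) =====
-- inf = '12345$54321'
--
-- def find(pos):
--   if pos <= 11:
--     return inf[pos-1]
--   L, step = 5, 1
--   while L < pos:
--     L = L*2 + step
--     step += 1
--   left = (L - step + 1) // 2
--   if left < pos < left+step:
--     return '$'
--   return find(pos-left-step+1)
-- ===== SOURCE B (Python) =====
-- inf = '12345$54321'
--
-- def find(pos):
--     # Build the level stack once (each level = (length-of-left-copy, size-of-'$'-block)),
--     # then peel it top-down, adjusting pos; no ladder is ever recomputed.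
--     levels = []
--     L, s = 11, 2
--     while L < pos:
--         levels.append((L, s))
--         L, s = L * 2 + s, s + 1
--     while levels:
--         L, s = levels.pop()
--         if pos <= L:
--             continue
--         if pos <= L + s:
--             return '$'
--         pos -= L + s
--     return inf[pos - 1]
-- ===== Notes on version B (the rewrite author's own statement) =====
-- stated objective: alternative
-- what changed: A is a recursion that recomputes the whole L/step ladder from (5,1) at every recursive step; B builds the level stack once with a single ladder pass and then peels it top-down in one loop, adjusting pos as it descends, so no ladder is ever recomputed.
import Mathlib
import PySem

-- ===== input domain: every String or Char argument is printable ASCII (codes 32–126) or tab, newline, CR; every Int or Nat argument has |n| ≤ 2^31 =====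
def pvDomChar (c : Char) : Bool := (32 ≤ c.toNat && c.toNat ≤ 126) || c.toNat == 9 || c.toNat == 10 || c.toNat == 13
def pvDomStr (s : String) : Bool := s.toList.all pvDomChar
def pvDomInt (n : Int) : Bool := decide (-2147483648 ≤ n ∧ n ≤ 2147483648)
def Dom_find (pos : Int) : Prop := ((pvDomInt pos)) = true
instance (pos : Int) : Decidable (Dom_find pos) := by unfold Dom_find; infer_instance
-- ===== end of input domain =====

-- B replaces A's recursion (which recomputes the whole L/step ladder from (5,1) at every
-- recursive step) by one ladder pass that stores the level stack, then a single top-down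
-- peel of that stack.  (Loops are ported with a fuel counter as a totality guard only:
-- the fuel is provably never exhausted on the path the Python takes.)

-- ===== PORT A =====
def pyInf : String := "12345$54321"

-- `return inf[pos-1]` (a 1-character string; "" is the unreachable IndexError filler,
-- excluded by Pre_find)
def pyBase (pos : Int) : String :=
  (PySem.Str.pyGet? pyInf (pos - 1)).elim "" (fun c => String.ofList [c])

-- A's inner `while L < pos: L = L*2 + step; step += 1` loop
def ladderA : Nat → Int → Int → Int → Int × Int
  | 0, _, L, step => (L, step)
  | f + 1, pos, L, step =>
      if L < pos then ladderA f pos (L*2 + step) (step + 1) else (L, step)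

def pyLadder (pos : Int) : Int × Int := ladderA (pos - 5).toNat pos 5 1

-- `left = (L - step + 1) // 2`
def pyLeft (pos : Int) : Int := PySem.Int.floordiv ((pyLadder pos).1 - (pyLadder pos).2 + 1) 2

def findGo : Nat → Int → String
  | 0, pos => pyBase pos      -- fuel guard; for the initial fuel pos.toNat this is reached
                              -- only with pos ≤ 0 ≤ 11, where it is exactly A's base case
  | f + 1, pos =>
      if pos ≤ 11 then pyBase pos
      else
        if pyLeft pos < pos ∧ pos < pyLeft pos + (pyLadder pos).2 then "$"
        else findGo f (pos - pyLeft pos - (pyLadder pos).2 + 1)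

def find (pos : Int) : String := findGo pos.toNat pos

-- ===== PORT B =====
-- `levels = []; L, s = 11, 2; while L < pos: levels.append((L, s)); L, s = L*2 + s, s + 1`
def buildGo : Nat → Int → Int → Int → List (Int × Int) → List (Int × Int)
  | 0, _, _, _, acc => acc
  | f + 1, pos, L, s, acc =>
      if L < pos then buildGo f pos (L*2 + s) (s + 1) (acc ++ [(L, s)]) else acc

-- `while levels: L, s = levels.pop(); …` then `return inf[pos-1]` — popping from the end
-- of `levels` is walking the reversed list front-to-back.
def peel : List (Int × Int) → Int → String
  | [], pos => pyBase pos
  | (L, s) :: rest, pos =>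
      if pos ≤ L then peel rest pos
      else if pos ≤ L + s then "$"
      else peel rest (pos - (L + s))

def find_alt (pos : Int) : String :=
  peel (buildGo (pos - 11).toNat pos 11 2 []).reverse pos

-- ===== PRECONDITION & SPEC =====
-- Pre_ excludes pos ≤ -11, where Python's inf[pos-1] raises IndexError in both A and B.
def Pre_find (pos : Int) : Prop := -10 ≤ pos
instance (pos : Int) : Decidable (Pre_find pos) := by unfold Pre_find; infer_instance
def pvWitness_find : Int := 12

def Spec_find (pos : Int) (out : String) : Prop := out = find_alt pos
instance (pos : Int) (out : String) : Decidable (Spec_find pos out) := by unfold Spec_find; infer_instance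

-- ===== CLAIM (what is proved, stated in full; the proofs are below) =====
def Claim_equal_find : Prop := ∀ (pos : Int), Dom_find pos → Pre_find pos → Spec_find pos (find pos)

-- ===== LEMMAS AND PROOFS =====

-- the sequence of levels B stacks up: lev 0 = (11, 2), lev (n+1) = (L*2 + s, s + 1)
def lev : Nat → Int × Int
  | 0 => (11, 2)
  | n + 1 => ((lev n).1 * 2 + (lev n).2, (lev n).2 + 1)

theorem lev_bounds (n : Nat) : 11 ≤ (lev n).1 ∧ 2 ≤ (lev n).2 := by
  induction n with
  | zero => exact ⟨by norm_num [lev], by norm_num [lev]⟩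
  | succ n ih => exact ⟨by simp only [lev]; omega, by simp only [lev]; omega⟩

theorem lev_lb (n : Nat) : 11 + (n : Int) ≤ (lev n).1 := by
  induction n with
  | zero => norm_num [lev]
  | succ n ih => have hb := lev_bounds n; simp only [lev]; push_cast; omega

theorem lev_mono {m n : Nat} (h : m ≤ n) : (lev m).1 ≤ (lev n).1 := by
  induction n with
  | zero => simp [Nat.le_zero.mp h]
  | succ n ih =>
    rcases Nat.lt_or_ge m (n + 1) with h' | h'
    · have := ih (by omega)
      have hb := lev_bounds n
      simp only [lev]; omega
    · have : m = n + 1 := by omega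
      simp [this]

theorem lev_unbounded (pos : Int) : ∃ n : Nat, pos ≤ (lev n).1 := by
  refine ⟨pos.toNat, ?_⟩
  have := lev_lb pos.toNat
  omega

-- ladder chaining: with enough fuel, the ladder started at level k stops at the first level ≥ pos
theorem ladderA_lev (pos : Int) : ∀ (d k fuel : Nat), d ≤ fuel →
    (∀ j, j < d → (lev (k + j)).1 < pos) → pos ≤ (lev (k + d)).1 →
    ladderA fuel pos (lev k).1 (lev k).2 = lev (k + d) := by
  intro d
  induction d with
  | zero =>
    intro k fuel _ _ hge
    have hstop : ¬ (lev k).1 < pos := by simpa using Int.not_lt.mpr hge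
    match fuel with
    | 0 => simp [ladderA]
    | f + 1 => rw [ladderA, if_neg hstop]; simp
  | succ d ih =>
    intro k fuel hfuel hlt hge
    have h0 : (lev k).1 < pos := by simpa using hlt 0 (by omega)
    match fuel with
    | f + 1 =>
      rw [ladderA, if_pos h0]
      have e1 : (lev k).1 * 2 + (lev k).2 = (lev (k + 1)).1 := by simp [lev]
      have e2 : (lev k).2 + 1 = (lev (k + 1)).2 := by simp [lev]
      have goal := ih (k + 1) f (by omega)
        (fun j hj => by have := hlt (j + 1) (by omega); simpa [Nat.add_assoc, Nat.add_comm 1 j] using this)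
        (by have := hge; simpa [Nat.add_assoc, Nat.add_comm 1 d] using this)
      simp only [e1, e2] at *
      rw [goal]
      congr 1
      omega

-- build chaining: the stack is exactly the levels below pos
theorem buildGo_lev (pos : Int) : ∀ (d k fuel : Nat) (acc : List (Int × Int)), d ≤ fuel →
    (∀ j, j < d → (lev (k + j)).1 < pos) → pos ≤ (lev (k + d)).1 →
    buildGo fuel pos (lev k).1 (lev k).2 acc = acc ++ (List.range' k d).map lev := by
  intro d
  induction d with
  | zero =>
    intro k fuel acc _ _ hge
    have hstop : ¬ (lev k).1 < pos := by simpa using Int.not_lt.mpr hge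
    match fuel with
    | 0 => simp [buildGo]
    | f + 1 => rw [buildGo, if_neg hstop]; simp
  | succ d ih =>
    intro k fuel acc hfuel hlt hge
    have h0 : (lev k).1 < pos := by simpa using hlt 0 (by omega)
    match fuel with
    | f + 1 =>
      rw [buildGo, if_pos h0]
      have e1 : (lev k).1 * 2 + (lev k).2 = (lev (k + 1)).1 := by simp [lev]
      have e2 : (lev k).2 + 1 = (lev (k + 1)).2 := by simp [lev]
      have goal := ih (k + 1) f (acc ++ [((lev k).1, (lev k).2)]) (by omega)
        (fun j hj => by have := hlt (j + 1) (by omega); simpa [Nat.add_assoc, Nat.add_comm 1 j] using this)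
        (by have := hge; simpa [Nat.add_assoc, Nat.add_comm 1 d] using this)
      simp only [e1, e2] at *
      rw [goal]
      rw [List.range'_succ]
      simp

-- the reversed stack for n levels
def revLev (n : Nat) : List (Int × Int) := ((List.range n).map lev).reverse

theorem revLev_succ (n : Nat) : revLev (n + 1) = lev n :: revLev n := by
  simp [revLev, List.range_succ]

theorem peel_cons (p : Int × Int) (rest : List (Int × Int)) (q : Int) :
    peel (p :: rest) q =
      if q ≤ p.1 then peel rest q
      else if q ≤ p.1 + p.2 then "$" else peel rest (q - (p.1 + p.2)) := by
  obtain ⟨L, s⟩ := p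
  rfl

theorem peel_base (pos : Int) (hp : pos ≤ 11) : ∀ n, peel (revLev n) pos = pyBase pos := by
  intro n
  induction n with
  | zero => rfl
  | succ n ih =>
    rw [revLev_succ, peel_cons, if_pos (by have := lev_bounds n; omega)]
    exact ih

-- one step of A's outer recursion, for pos > 11: what the recomputed ladder returns
theorem pyLadder_lev {pos : Int} {n : Nat} (hn : pos ≤ (lev (n + 1)).1)
    (hsk : (lev n).1 < pos) : pyLadder pos = lev (n + 1) := by
  have hb := lev_bounds n
  have h12 : 12 ≤ pos := by omega
  have hlb := lev_lb n
  obtain ⟨f, hf⟩ : ∃ f, (pos - 5).toNat = f + 1 := ⟨(pos - 5).toNat - 1, by omega⟩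
  unfold pyLadder
  rw [hf, ladderA, if_pos (by omega)]
  have := ladderA_lev pos (n + 1) 0 f (by omega)
    (fun j hj => by
      have hmono := lev_mono (show j ≤ n by omega)
      simp only [Nat.zero_add]
      omega)
    (by simpa using hn)
  simp only [lev] at this
  norm_num at this ⊢
  exact this

-- MAIN: A's recursion, run with any sufficient fuel, computes the same string as peeling
-- any stack that is tall enough
theorem main_lemma : ∀ (fuel : Nat) (pos : Int), pos.toNat ≤ fuel →
    ∀ n, pos ≤ (lev n).1 → findGo fuel pos = peel (revLev n) pos := by
  intro fuel
  induction fuel with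
  | zero =>
    intro pos hN n _
    rw [findGo, peel_base pos (by omega) n]
  | succ f ihf =>
    intro pos hN n hn
    by_cases hp : pos ≤ 11
    · rw [peel_base pos hp n, findGo, if_pos hp]
    · -- pos ≥ 12
      induction n with
      | zero => exact absurd hn (by simp [lev]; omega)
      | succ n ihn =>
        rw [revLev_succ]
        by_cases hsk : pos ≤ (lev n).1
        · -- peel skips this level
          rw [peel_cons, if_pos hsk]
          exact ihn hsk
        · rw [Int.not_le] at hsk
          have hb := lev_bounds n
          have hlad : pyLadder pos = lev (n + 1) := pyLadder_lev hn hsk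
          have hleft : pyLeft pos = (lev n).1 := by
            unfold pyLeft
            rw [hlad]
            have e : (lev (n + 1)).1 - (lev (n + 1)).2 + 1 = (lev n).1 * 2 := by
              simp only [lev]; ring
            rw [e, PySem.Int.floordiv_eq_iff_of_pos (by omega)]
            omega
          have hs2 : (lev (n + 1)).2 = (lev n).2 + 1 := by simp [lev]
          have hn' : pos ≤ (lev n).1 * 2 + (lev n).2 := by
            have : (lev (n + 1)).1 = (lev n).1 * 2 + (lev n).2 := by simp [lev]
            omega
          rw [findGo, if_neg (by omega), hleft, hlad, hs2]
          obtain ⟨hL11, hs2'⟩ := hb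
          by_cases hdl : pos ≤ (lev n).1 + (lev n).2
          · -- '$' on both sides
            have condA : (lev n).1 < pos ∧ pos < (lev n).1 + ((lev n).2 + 1) := ⟨hsk, by omega⟩
            rw [if_pos condA]
            rw [peel_cons, if_neg (by omega), if_pos hdl]
          · -- reduce and recurse / continue peeling
            rw [if_neg (by omega)]
            have ered : pos - (lev n).1 - ((lev n).2 + 1) + 1 = pos - ((lev n).1 + (lev n).2) := by ring
            rw [ered]
            have hrec := ihf (pos - ((lev n).1 + (lev n).2)) (by omega) n (by omega)
            rw [peel_cons, if_neg (by omega), if_neg hdl, ← hrec]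

theorem find_alt_eq (pos : Int) : find_alt pos = peel (revLev (Nat.find (lev_unbounded pos))) pos := by
  unfold find_alt
  have hfind := Nat.find_spec (lev_unbounded pos)
  have hmin : ∀ j, j < Nat.find (lev_unbounded pos) → (lev j).1 < pos := by
    intro j hj
    have := Nat.find_min (lev_unbounded pos) hj
    omega
  have hfuel : Nat.find (lev_unbounded pos) ≤ (pos - 11).toNat := by
    by_contra hc
    rw [Nat.not_le] at hc
    have := hmin (pos - 11).toNat hc
    have := lev_lb (pos - 11).toNat
    omega
  have hb := buildGo_lev pos (Nat.find (lev_unbounded pos)) 0 (pos - 11).toNat [] hfuel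
    (fun j hj => by simpa using hmin j hj) (by simpa using hfind)
  have e : buildGo (pos - 11).toNat pos 11 2 [] =
      buildGo (pos - 11).toNat pos (lev 0).1 (lev 0).2 [] := by
    simp [lev]
  rw [e, hb]
  simp [revLev, List.range'_eq_map_range]

-- ===== VERDICT (by name: the statement is the Claim_ definition above) =====
theorem find_spec : Claim_equal_find := by
  intro pos _ _
  unfold Spec_find
  rw [find_alt_eq pos]
  exact main_lemma pos.toNat pos le_rfl _ (Nat.find_spec (lev_unbounded pos))
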